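-- pv_equiv track=rewrite | github.com/jaytula/python-wars | most_valuable_character.py | solve
-- ===== SOURCE A (Python) =====
-- def solve(st: str):
--     most_valuable = ''
--     value = 0
--
--     for ch in st:
--       current_value = st.rfind(ch) - st.find(ch)
--       if most_valuable == '' or current_value > value or (current_value == value and ord(ch) < ord(most_valuable)):
--         most_valuable = ch
--         value = current_value
--
--     return most_valuable
-- ===== SOURCE B (Python) =====
-- def solve(st: str):
--     if not st:
--         return ''
--     first = {}
--     last = {}
--     for i, ch in enumerate(st):
--         first.setdefault(ch, i)
--         last[ch] = i
--     return min(first, key=lambda ch: (first[ch] - last[ch], ch))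
-- ===== Notes on version B (the rewrite author's own statement) =====
-- stated objective: faster
-- what changed: A calls st.rfind/st.find (two full scans) for every character position inside its best-so-far loop; B makes a single pass recording the first and last occurrence index of each character in two dicts, then picks the minimum of (first-last, ch) over the distinct characters, with no rfind/find scans at all.
import Mathlib
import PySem

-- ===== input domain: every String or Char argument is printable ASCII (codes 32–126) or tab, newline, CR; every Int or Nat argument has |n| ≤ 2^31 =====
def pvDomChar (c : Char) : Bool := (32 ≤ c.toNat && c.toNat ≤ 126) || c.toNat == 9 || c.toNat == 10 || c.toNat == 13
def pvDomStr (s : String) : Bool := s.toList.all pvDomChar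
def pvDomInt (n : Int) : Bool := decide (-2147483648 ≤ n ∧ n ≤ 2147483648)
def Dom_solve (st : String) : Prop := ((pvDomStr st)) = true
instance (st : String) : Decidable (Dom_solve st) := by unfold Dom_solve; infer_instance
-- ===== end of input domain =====

-- B replaces A's per-position rfind/find scans by one pass recording each character's
-- first and last occurrence index in two dicts, then a single min over the distinct
-- characters; objective: faster (one pass instead of two full scans per position).

-- ===== PORT A =====
-- ord of a one-character Python string (A only evaluates it after the `most_valuable == ''` short-circuit, i.e. on a 1-char string, where this is exact)
def pvOrd (s : String) : Nat := (s.toList.headD ' ').toNat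

-- A's loop body: cur = st.rfind(ch) - st.find(ch); replace (most_valuable, value) if better
def pvStepA (st : String) (acc : String × Int) (ch : Char) : String × Int :=
  let cur : Int := PySem.Str.rfind st (String.ofList [ch]) - PySem.Str.find st (String.ofList [ch])
  if acc.1 = "" ∨ cur > acc.2 ∨ (cur = acc.2 ∧ ch.toNat < pvOrd acc.1)
  then (String.ofList [ch], cur) else acc

def solve (st : String) : String :=
  (st.toList.foldl (pvStepA st) ("", 0)).1

-- ===== PORT B =====
-- B's loop body: first.setdefault(ch, i); last[ch] = i
def pvStepB (acc : PySem.Dict Char Int × PySem.Dict Char Int) (p : Int × Char) :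
    PySem.Dict Char Int × PySem.Dict Char Int :=
  (acc.1.setdefault p.2 p.1, acc.2.insert p.2 p.1)

def solve_alt (st : String) : String :=
  if st = "" then ""
  else
    let fl := (PySem.List.enumerate st.toList).foldl pvStepB (PySem.Dict.empty, PySem.Dict.empty)
    match PySem.List.min2? fl.1.keys (fun ch => fl.1.getD ch 0 - fl.2.getD ch 0) (fun ch => ch) with
    | some c => String.ofList [c]
    | none => ""

-- ===== PRECONDITION & SPEC =====
def Spec_solve (st : String) (out : String) : Prop := out = solve_alt st
instance (st : String) (out : String) : Decidable (Spec_solve st out) := by unfold Spec_solve; infer_instance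

-- ===== CLAIM (what is proved, stated in full; the proofs are below) =====
def Claim_equal_solve : Prop := ∀ (st : String), Dom_solve st → Spec_solve st (solve st)

-- ===== LEMMAS AND PROOFS =====

-- the span A associates to a character
def pvW (st : String) (c : Char) : Int :=
  PySem.Str.rfind st (String.ofList [c]) - PySem.Str.find st (String.ofList [c])

-- "a beats b": strictly larger span, or equal span and smaller code point
def pvLt (w : Char → Int) (a b : Char) : Bool :=
  decide (w b < w a ∨ (w a = w b ∧ a.toNat < b.toNat))

-- the running best both programs determine
def pvBest (w : Char → Int) (m : Char) : List Char → Char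
  | [] => m
  | c :: l => pvBest w (if pvLt w c m then c else m) l

-- the index of the LAST occurrence of c in l (meaningful when c ∈ l)
def pvLastIdx (c : Char) : List Char → Nat
  | [] => 0
  | _ :: t => if c ∈ t then pvLastIdx c t + 1 else 0

lemma pvLt_iff (w : Char → Int) (a b : Char) :
    pvLt w a b = true ↔ (w b < w a ∨ (w a = w b ∧ a.toNat < b.toNat)) := by
  simp [pvLt]

lemma pvOfList_ne_empty (m : Char) : String.ofList [m] ≠ "" := by
  intro h
  have h2 := congrArg String.toList h
  simp at h2

lemma pvCharLt_iff (a b : Char) : a < b ↔ a.toNat < b.toNat := by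
  rw [Char.lt_def]
  exact UInt32.lt_iff_toNat_lt

lemma pvChar_eq_of_toNat_eq {a b : Char} (h : a.toNat = b.toNat) : a = b := by
  apply Char.ext
  exact UInt32.toNat_inj.mp h

lemma pvLt_connex {w : Char → Int} {a b : Char}
    (h1 : ¬ pvLt w a b = true) (h2 : ¬ pvLt w b a = true) : a = b := by
  rw [pvLt_iff] at h1 h2
  apply pvChar_eq_of_toNat_eq
  omega

lemma pvBest_mem (w : Char → Int) (l : List Char) : ∀ m, pvBest w m l ∈ m :: l := by
  induction l with
  | nil => intro m; simp [pvBest]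
  | cons c l ih =>
    intro m
    simp only [pvBest]
    by_cases hc : pvLt w c m = true
    · rw [if_pos hc]
      have h := ih c
      rcases List.mem_cons.mp h with h | h
      · rw [h]; simp
      · simp [h]
    · rw [if_neg hc]
      have h := ih m
      rcases List.mem_cons.mp h with h | h
      · rw [h]; simp
      · simp [h]

lemma pvBest_not_lt (w : Char → Int) (l : List Char) :
    ∀ m x, x ∈ m :: l → ¬ pvLt w x (pvBest w m l) = true := by
  induction l with
  | nil =>
    intro m x hx
    simp at hx
    subst hx
    simp only [pvBest]
    rw [pvLt_iff]
    omega
  | cons c l ih =>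
    intro m x hx
    simp only [pvBest]
    by_cases hc : pvLt w c m = true
    · rw [if_pos hc]
      rw [pvLt_iff] at hc
      have hbest := ih c c (by simp)
      rw [pvLt_iff] at hbest
      rcases List.mem_cons.mp hx with hx | hx
      · subst hx
        rw [pvLt_iff]
        omega
      rcases List.mem_cons.mp hx with hx | hx
      · subst hx; rw [pvLt_iff]; omega
      · exact ih c x (List.mem_cons_of_mem _ hx)
    · rw [if_neg hc]
      rw [pvLt_iff] at hc
      have hbest := ih m m (by simp)
      rw [pvLt_iff] at hbest
      rcases List.mem_cons.mp hx with hx | hx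
      · subst hx; rw [pvLt_iff]; omega
      rcases List.mem_cons.mp hx with hx | hx
      · subst hx
        rw [pvLt_iff]
        omega
      · exact ih m x (List.mem_cons_of_mem _ hx)

lemma pvBest_eq_of_mem_iff (w : Char → Int) (m : Char) (l₁ l₂ : List Char)
    (h : ∀ x, x ∈ m :: l₁ ↔ x ∈ m :: l₂) : pvBest w m l₁ = pvBest w m l₂ := by
  apply pvLt_connex (w := w)
  · exact pvBest_not_lt w l₂ m _ ((h _).mp (pvBest_mem w l₁ m))
  · exact pvBest_not_lt w l₁ m _ ((h _).mpr (pvBest_mem w l₂ m))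

lemma pvStepA_eq (st : String) (m c : Char) :
    pvStepA st (String.ofList [m], pvW st m) c =
      (String.ofList [if pvLt (pvW st) c m then c else m],
       pvW st (if pvLt (pvW st) c m then c else m)) := by
  have hord : pvOrd (String.ofList [m]) = m.toNat := by simp [pvOrd]
  have hne := pvOfList_ne_empty m
  by_cases hc : pvLt (pvW st) c m = true
  · rw [if_pos hc]
    rw [pvLt_iff] at hc
    simp only [pvStepA]
    rw [if_pos]
    · unfold pvW; rfl
    · rw [hord]
      unfold pvW at hc ⊢
      right
      omega
  · rw [if_neg hc]
    rw [pvLt_iff] at hc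
    simp only [pvStepA]
    rw [if_neg]
    rw [hord]
    unfold pvW at hc ⊢
    rintro (h | h | ⟨h1, h2⟩)
    · exact hne h
    · omega
    · omega

lemma pvFoldA (st : String) (l : List Char) :
    ∀ m, l.foldl (pvStepA st) (String.ofList [m], pvW st m) =
      (String.ofList [pvBest (pvW st) m l], pvW st (pvBest (pvW st) m l)) := by
  induction l with
  | nil => intro m; simp [pvBest]
  | cons c l ih =>
    intro m
    rw [List.foldl_cons, pvStepA_eq, ih]
    simp [pvBest]

lemma pvSolve_eq (st : String) (c : Char) (l : List Char) (h : st.toList = c :: l) :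
    solve st = String.ofList [pvBest (pvW st) c l] := by
  unfold solve
  rw [h, List.foldl_cons]
  have h0 : pvStepA st ("", 0) c = (String.ofList [c], pvW st c) := by
    unfold pvStepA pvW
    rw [if_pos (Or.inl rfl)]
  rw [h0, pvFoldA]

-- one step of B's min over keys: the two leading elements collapse to the better one
lemma pvMin2_cons2 (w k : Char → Int) (m c : Char) (l : List Char)
    (hkc : k c = - w c) (hkm : k m = - w m) :
    PySem.List.min2? (m :: c :: l) k (fun ch => ch) =
      PySem.List.min2? ((if pvLt w c m then c else m) :: l) k (fun ch => ch) := by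
  unfold PySem.List.min2?
  simp only [List.foldl_cons]
  congr 1
  show (if (decide (k c < k m)
        || (!decide (k m < k c) && decide ((fun ch : Char => ch) c < (fun ch : Char => ch) m))) = true
      then some c else some m) = some (if pvLt w c m then c else m)
  rw [hkc, hkm]
  simp only [Bool.or_eq_true, Bool.and_eq_true, Bool.not_eq_true', decide_eq_true_eq,
    decide_eq_false_iff_not]
  by_cases hc : pvLt w c m = true
  · rw [if_pos hc]
    rw [pvLt_iff] at hc
    rw [if_pos]
    rcases hc with h | ⟨h1, h2⟩
    · left; omega
    · exact Or.inr ⟨by omega, (pvCharLt_iff c m).mpr h2⟩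
  · rw [if_neg hc]
    rw [pvLt_iff] at hc
    rw [if_neg]
    rintro (h | ⟨h1, h2⟩)
    · omega
    · have h2' := (pvCharLt_iff c m).mp h2
      omega

-- B's min over the keys, for any key agreeing with -(span) on the listed characters
lemma pvFoldB (w k : Char → Int) (l : List Char) :
    ∀ m, (∀ x ∈ m :: l, k x = - w x) →
      PySem.List.min2? (m :: l) k (fun ch => ch) = some (pvBest w m l) := by
  induction l with
  | nil => intro m _; rfl
  | cons c l ih =>
    intro m h
    have harg : ∀ x ∈ (if pvLt w c m then c else m) :: l, k x = - w x := by
      intro x hx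
      rcases List.mem_cons.mp hx with hx | hx
      · subst hx
        by_cases hcm : pvLt w c m = true
        · rw [if_pos hcm]; exact h c (by simp)
        · rw [if_neg hcm]; exact h m (by simp)
      · exact h x (by simp [hx])
    rw [pvMin2_cons2 w k m c l (h c (by simp)) (h m (by simp)), ih _ harg]
    simp [pvBest]

-- [c] is a prefix exactly where the character sits
lemma pvSingleton_prefix_iff (c : Char) (xs : List Char) :
    [c] <+: xs ↔ xs.head? = some c := by
  cases xs with
  | nil => simp
  | cons x t =>
    constructor
    · rintro ⟨s, hs⟩
      cases hs
      rfl
    · intro h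
      simp at h
      subst h
      exact ⟨t, rfl⟩

-- find on a single-character needle is the first index
lemma pvFindGo_single (c : Char) (l : List Char) :
    ∀ k : Nat, c ∈ l → PySem.Chars.find.go [c] l k = (k : Int) + (l.idxOf c : Int) := by
  induction l with
  | nil => intro k h; cases h
  | cons x t ih =>
    intro k h
    by_cases hx : x = c
    · subst hx
      simp [PySem.Chars.find.go, List.isPrefixOf]
    · have hct : c ∈ t := by
        rcases List.mem_cons.mp h with h | h
        · exact absurd h.symm hx
        · exact h
      have hpre : [c].isPrefixOf (x :: t) = false := by
        simp [List.isPrefixOf]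
        intro h'
        exact hx h'.symm
      rw [PySem.Chars.find.go, hpre]
      simp only [Bool.false_eq_true, if_false]
      rw [ih (k + 1) hct]
      have hbx : (x == c) = false := beq_eq_false_iff_ne.mpr hx
      have : (x :: t).idxOf c = t.idxOf c + 1 := by
        rw [List.idxOf_cons, hbx]
        rfl
      rw [this]
      push_cast
      ring

lemma pvFind_single (c : Char) (l : List Char) (h : c ∈ l) :
    PySem.Chars.find l [c] = (l.idxOf c : Int) := by
  unfold PySem.Chars.find
  rw [pvFindGo_single c l 0 h]
  simp

-- pvLastIdx really is the last occurrence
lemma pvLastIdx_getElem (c : Char) (l : List Char) (h : c ∈ l) :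
    l[pvLastIdx c l]? = some c := by
  induction l with
  | nil => cases h
  | cons x t ih =>
    by_cases hct : c ∈ t
    · simp only [pvLastIdx, if_pos hct]
      simpa using ih hct
    · have hx : x = c := by
        rcases List.mem_cons.mp h with h | h
        · exact h.symm
        · exact absurd h hct
      simp [pvLastIdx, hct, hx]

lemma pvLastIdx_max (c : Char) (l : List Char) :
    ∀ j, pvLastIdx c l < j → l[j]? ≠ some c := by
  induction l with
  | nil => intro j _; simp
  | cons x t ih =>
    intro j hj
    by_cases hct : c ∈ t
    · simp only [pvLastIdx, if_pos hct] at hj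
      have hj1 : 1 ≤ j := by omega
      intro hcontra
      have : t[j - 1]? = some c := by
        rw [← hcontra]
        rcases Nat.exists_eq_add_of_le hj1 with ⟨j', rfl⟩
        simp [Nat.add_comm]
      exact ih (j - 1) (by omega) this
    · simp only [pvLastIdx, if_neg hct] at hj
      intro hcontra
      have hj1 : 1 ≤ j := by omega
      have : t[j - 1]? = some c := by
        rw [← hcontra]
        rcases Nat.exists_eq_add_of_le hj1 with ⟨j', rfl⟩
        simp [Nat.add_comm]
      exact hct (List.mem_of_getElem? this)

-- rfind on a single-character needle is the last index
lemma pvRfindGo_single (c : Char) (l : List Char) :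
    ∀ n : Nat, c ∈ l → pvLastIdx c l ≤ n → PySem.Chars.rfind.go l [c] n = (pvLastIdx c l : Int) := by
  intro n
  induction n with
  | zero =>
    intro h hle
    have h0 : pvLastIdx c l = 0 := by omega
    have hpre : [c].isPrefixOf l = true := by
      rw [List.isPrefixOf_iff_prefix, pvSingleton_prefix_iff]
      have := pvLastIdx_getElem c l h
      rw [h0] at this
      rw [List.head?_eq_getElem?]
      exact this
    rw [PySem.Chars.rfind.go, hpre]
    simp [h0]
  | succ j ih =>
    intro h hle
    by_cases heq : pvLastIdx c l = j + 1
    · have hpre : [c].isPrefixOf (l.drop (j + 1)) = true := by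
        rw [List.isPrefixOf_iff_prefix, pvSingleton_prefix_iff]
        have := pvLastIdx_getElem c l h
        rw [heq] at this
        rw [List.head?_drop]
        exact this
      rw [PySem.Chars.rfind.go, hpre]
      simp [heq]
    · have hlt : pvLastIdx c l ≤ j := by omega
      have hpre : [c].isPrefixOf (l.drop (j + 1)) = false := by
        rw [Bool.eq_false_iff]
        intro hcontra
        rw [List.isPrefixOf_iff_prefix, pvSingleton_prefix_iff, List.head?_drop] at hcontra
        exact pvLastIdx_max c l (j + 1) (by omega) hcontra
      rw [PySem.Chars.rfind.go, hpre]
      simp only [Bool.false_eq_true, if_false]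
      exact ih h hlt

lemma pvLastIdx_lt_length (c : Char) (l : List Char) (h : c ∈ l) :
    pvLastIdx c l < l.length := by
  induction l with
  | nil => cases h
  | cons x t ih =>
    by_cases hct : c ∈ t
    · simp only [pvLastIdx, if_pos hct, List.length_cons]
      exact Nat.succ_lt_succ (ih hct)
    · simp [pvLastIdx, hct]

lemma pvRfind_single (c : Char) (l : List Char) (h : c ∈ l) :
    PySem.Chars.rfind l [c] = (pvLastIdx c l : Int) := by
  unfold PySem.Chars.rfind
  exact pvRfindGo_single c l l.length h (Nat.le_of_lt (pvLastIdx_lt_length c l h))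

-- ===== the dict-building fold of B =====

-- the first-occurrence dict: getD
lemma pvFL_first_getD (l : List Char) :
    ∀ (s : Int) (d1 d2 : PySem.Dict Char Int) (c : Char) (dflt : Int),
      (((PySem.List.enumerate l s).foldl pvStepB (d1, d2)).1).getD c dflt =
        if d1.contains c then d1.getD c dflt
        else if c ∈ l then s + (l.idxOf c : Int) else dflt := by
  induction l with
  | nil =>
    intro s d1 d2 c dflt
    rw [PySem.List.enumerate_nil]
    simp only [List.foldl_nil]
    by_cases hc : d1.contains c = true
    · rw [if_pos hc]
    · rw [if_neg hc, if_neg (by simp)]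
      exact PySem.Dict.getD_of_not_contains d1 dflt (by simpa using hc)
  | cons x t ih =>
    intro s d1 d2 c dflt
    rw [PySem.List.enumerate_cons, List.foldl_cons]
    show (((PySem.List.enumerate t (s + 1)).foldl pvStepB (d1.setdefault x s, d2.insert x s)).1).getD c dflt = _
    rw [ih]
    by_cases hc : d1.contains c = true
    · have hc' : (d1.setdefault x s).contains c = true := by
        rw [PySem.Dict.contains_setdefault]
        simp [hc]
      rw [if_pos hc', if_pos hc]
      by_cases hxc : c = x
      · subst hxc
        rw [PySem.Dict.setdefault_of_contains d1 s hc]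
      · rw [PySem.Dict.getD_eq_get?_getD, PySem.Dict.get?_setdefault_of_ne d1 s hxc,
            ← PySem.Dict.getD_eq_get?_getD]
    · rw [if_neg hc]
      by_cases hxc : c = x
      · subst hxc
        have hc' : (d1.setdefault c s).contains c = true := by
          simp [PySem.Dict.contains_setdefault]
        rw [if_pos hc']
        have : (d1.setdefault c s).getD c dflt = s := by
          rw [PySem.Dict.setdefault_of_not_contains d1 s (by simpa using hc),
              PySem.Dict.getD_insert_self]
        rw [this, if_pos (by simp), List.idxOf_cons_self]
        simp
      · have hbx : (x == c) = false := beq_eq_false_iff_ne.mpr (fun h' => hxc h'.symm)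
        have hcx : (c == x) = false := beq_eq_false_iff_ne.mpr hxc
        have hc' : (d1.setdefault x s).contains c = false := by
          rw [PySem.Dict.contains_setdefault d1 x c s, hcx,
              (by simpa using hc : d1.contains c = false)]
          rfl
        rw [if_neg (by simp [hc'])]
        have hmem : (c ∈ x :: t) ↔ (c ∈ t) := by
          simp
          intro h'
          exact absurd h' hxc
        by_cases hct : c ∈ t
        · rw [if_pos hct, if_pos (hmem.mpr hct)]
          have : (x :: t).idxOf c = t.idxOf c + 1 := by
            rw [List.idxOf_cons, hbx]
            rfl
          rw [this]
          push_cast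
          ring
        · rw [if_neg hct, if_neg (fun h => hct (hmem.mp h))]

-- the last-occurrence dict: getD
lemma pvFL_last_getD (l : List Char) :
    ∀ (s : Int) (d1 d2 : PySem.Dict Char Int) (c : Char) (dflt : Int),
      (((PySem.List.enumerate l s).foldl pvStepB (d1, d2)).2).getD c dflt =
        if c ∈ l then s + (pvLastIdx c l : Int) else d2.getD c dflt := by
  induction l with
  | nil =>
    intro s d1 d2 c dflt
    simp [PySem.List.enumerate_nil]
  | cons x t ih =>
    intro s d1 d2 c dflt
    rw [PySem.List.enumerate_cons, List.foldl_cons]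
    show (((PySem.List.enumerate t (s + 1)).foldl pvStepB (d1.setdefault x s, d2.insert x s)).2).getD c dflt = _
    rw [ih]
    by_cases hct : c ∈ t
    · rw [if_pos hct, if_pos (by simp [hct])]
      have : pvLastIdx c (x :: t) = pvLastIdx c t + 1 := by
        simp [pvLastIdx, hct]
      rw [this]
      push_cast
      ring
    · rw [if_neg hct]
      by_cases hxc : c = x
      · subst hxc
        rw [if_pos (by simp), PySem.Dict.getD_insert_self]
        have : pvLastIdx c (c :: t) = 0 := by simp [pvLastIdx, hct]
        rw [this]
        simp
      · rw [if_neg (by simp [hct]; exact hxc),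
            PySem.Dict.getD_eq_get?_getD, PySem.Dict.get?_insert_of_ne d2 s hxc,
            ← PySem.Dict.getD_eq_get?_getD]

-- keys of the first dict: membership
lemma pvFL_keys_mem (l : List Char) :
    ∀ (s : Int) (d1 d2 : PySem.Dict Char Int) (x : Char),
      x ∈ (((PySem.List.enumerate l s).foldl pvStepB (d1, d2)).1).keys ↔
        x ∈ d1.keys ∨ x ∈ l := by
  induction l with
  | nil =>
    intro s d1 d2 x
    simp [PySem.List.enumerate_nil]
  | cons c t ih =>
    intro s d1 d2 x
    rw [PySem.List.enumerate_cons, List.foldl_cons]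
    show x ∈ (((PySem.List.enumerate t (s + 1)).foldl pvStepB (d1.setdefault c s, d2.insert c s)).1).keys ↔ _
    rw [ih]
    rw [PySem.Dict.keys_setdefault]
    by_cases hc : d1.contains c = true
    · rw [if_pos hc]
      have hck : c ∈ d1.keys := (PySem.Dict.contains_iff_mem_keys d1 c).mp hc
      constructor
      · rintro (h | h)
        · exact Or.inl h
        · exact Or.inr (by simp [h])
      · rintro (h | h)
        · exact Or.inl h
        · rcases List.mem_cons.mp h with h | h
          · exact Or.inl (h ▸ hck)
          · exact Or.inr h
    · rw [if_neg hc]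
      simp only [List.mem_append, List.mem_cons]
      tauto

-- keys of the first dict only ever grow at the back
lemma pvFL_keys_prefix (l : List (Int × Char)) :
    ∀ (d1 d2 : PySem.Dict Char Int), ∃ rest,
      ((l.foldl pvStepB (d1, d2)).1).keys = d1.keys ++ rest := by
  induction l with
  | nil => intro d1 d2; exact ⟨[], by simp⟩
  | cons p t ih =>
    intro d1 d2
    rw [List.foldl_cons]
    rcases ih (d1.setdefault p.2 p.1) (d2.insert p.2 p.1) with ⟨rest, hrest⟩
    show ∃ r, ((t.foldl pvStepB (d1.setdefault p.2 p.1, d2.insert p.2 p.1)).1).keys = _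
    rw [hrest, PySem.Dict.keys_setdefault]
    by_cases hc : d1.contains p.2 = true
    · rw [if_pos hc]; exact ⟨rest, rfl⟩
    · rw [if_neg hc]; exact ⟨p.2 :: rest, by simp⟩

lemma pvSolveAlt_eq (st : String) (c : Char) (l : List Char) (h : st.toList = c :: l) :
    ∃ rest, (((PySem.List.enumerate st.toList 0).foldl pvStepB
        (PySem.Dict.empty, PySem.Dict.empty)).1).keys = c :: rest ∧
      solve_alt st = String.ofList [pvBest (pvW st) c rest] ∧
      (∀ x, x ∈ c :: rest ↔ x ∈ c :: l) := by
  have hne : st ≠ "" := by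
    intro he
    rw [he] at h
    simp at h
  -- head of the keys list
  have hkeys : ∃ rest, (((PySem.List.enumerate st.toList 0).foldl pvStepB
      (PySem.Dict.empty, PySem.Dict.empty)).1).keys = c :: rest := by
    rw [h, PySem.List.enumerate_cons, List.foldl_cons]
    show ∃ rest, (((PySem.List.enumerate l (0 + 1)).foldl pvStepB
      (PySem.Dict.empty.setdefault c 0, PySem.Dict.empty.insert c 0)).1).keys = _
    rcases pvFL_keys_prefix (PySem.List.enumerate l (0 + 1))
        (PySem.Dict.empty.setdefault c 0) (PySem.Dict.empty.insert c 0) with ⟨rest, hrest⟩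
    refine ⟨rest, ?_⟩
    rw [hrest]
    rfl
  rcases hkeys with ⟨rest, hrest⟩
  have hmem : ∀ x, x ∈ c :: rest ↔ x ∈ c :: l := by
    intro x
    rw [← hrest, pvFL_keys_mem st.toList 0 PySem.Dict.empty PySem.Dict.empty x, h]
    simp [PySem.Dict.keys_empty]
  refine ⟨rest, hrest, ?_, hmem⟩
  unfold solve_alt
  rw [if_neg hne]
  show (match PySem.List.min2? _ _ _ with
        | some c => String.ofList [c] | none => "") = _
  rw [hrest]
  -- replace the dict-lookup key by -(pvW st ·) on the members
  have hkey : ∀ x ∈ c :: rest,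
      (((PySem.List.enumerate st.toList 0).foldl pvStepB (PySem.Dict.empty, PySem.Dict.empty)).1).getD x 0
        - (((PySem.List.enumerate st.toList 0).foldl pvStepB (PySem.Dict.empty, PySem.Dict.empty)).2).getD x 0
      = - pvW st x := by
    intro x hx
    have hxst : x ∈ st.toList := by
      rw [h]
      exact (hmem x).mp hx
    rw [pvFL_first_getD, pvFL_last_getD]
    rw [if_neg (by simp [PySem.Dict.contains_empty]), if_pos hxst, if_pos hxst]
    unfold pvW
    simp only [PySem.Str.rfind_eq, PySem.Str.find_eq]
    have hlst : (String.ofList [x]).toList = [x] := by simp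
    rw [hlst, pvFind_single x st.toList hxst, pvRfind_single x st.toList hxst]
    ring
  rw [pvFoldB (pvW st) _ rest c hkey]

-- ===== VERDICT (by name: the statement is the Claim_ definition above) =====
theorem solve_spec : Claim_equal_solve := by
  intro st _
  unfold Spec_solve
  cases h : st.toList with
  | nil =>
    have hst : st = "" := by
      have h2 := congrArg String.ofList h
      simpa using h2
    subst hst
    rfl
  | cons c l =>
    rcases pvSolveAlt_eq st c l h with ⟨rest, _, halt, hmem⟩
    rw [pvSolve_eq st c l h, halt]
    rw [pvBest_eq_of_mem_iff (pvW st) c l rest (fun x => ((hmem x).symm))]
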